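-- pv_equiv track=rewrite | github.com/nguidotti/cuopt | python/cuopt_server/utils/microservice_perf.py | convert_cost_matrix_to_csr
-- ===== SOURCE A (Python) =====
-- def convert_cost_matrix_to_csr(np_cost_matrix):
--     num_nodes = len(np_cost_matrix)
--
--     offsets = []
--     edges = []
--     weights = []
--
--     cur_offset = 0
--     for ind_loc in range(num_nodes):
--         offsets.append(cur_offset)
--
--         new_edges = list(range(num_nodes))
--         new_edges.pop(ind_loc)
--         new_weights = list(np_cost_matrix[ind_loc])
--         new_weights.pop(ind_loc)
--
--         edges += new_edges
--         weights += new_weights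
--
--         cur_offset = len(edges)
--     offsets.append(cur_offset)
--
--     return offsets, edges, weights
-- ===== SOURCE B (Python) =====
-- def convert_cost_matrix_to_csr(np_cost_matrix):
--     num_nodes = len(np_cost_matrix)
--     offsets = [i * (num_nodes - 1) for i in range(num_nodes + 1)]
--     edges = [j for i in range(num_nodes) for j in range(num_nodes) if j != i]
--     weights = [np_cost_matrix[i][j]
--                for i in range(num_nodes) for j in range(num_nodes) if j != i]
--     return offsets, edges, weights
-- ===== Notes on version B (the rewrite author's own statement) =====
-- stated objective: simpler
-- what changed: Replaces the accumulator-threaded loop that builds each row by copying list(range(n))/list(row) and pop(i) surgery with a closed-form offsets list [i*(n-1)] and flat comprehensions that skip the diagonal by direct indexing with j != i.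
-- outside the precondition, e.g. on convert_cost_matrix_to_csr([[7, 8, 9]]): A returns ([0, 0], [], [8, 9]), B returns ([0, 0], [], [])
import Mathlib
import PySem

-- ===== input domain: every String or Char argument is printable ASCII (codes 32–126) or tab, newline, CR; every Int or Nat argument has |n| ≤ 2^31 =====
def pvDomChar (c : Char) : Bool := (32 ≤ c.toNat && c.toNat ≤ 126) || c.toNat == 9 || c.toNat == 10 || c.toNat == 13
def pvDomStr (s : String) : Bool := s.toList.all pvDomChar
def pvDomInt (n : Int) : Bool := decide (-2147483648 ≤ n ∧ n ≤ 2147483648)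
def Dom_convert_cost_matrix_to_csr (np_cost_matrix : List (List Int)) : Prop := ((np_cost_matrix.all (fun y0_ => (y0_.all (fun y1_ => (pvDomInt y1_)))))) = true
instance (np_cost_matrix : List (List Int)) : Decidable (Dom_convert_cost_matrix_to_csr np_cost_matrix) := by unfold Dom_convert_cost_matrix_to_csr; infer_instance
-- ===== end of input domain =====

-- B replaces A's accumulator-threaded pop(i) loop by closed-form offsets and flat diagonal-skipping comprehensions (objective: simpler).

-- ===== PORT A =====
-- one loop step of A: append cur_offset, build new_edges/new_weights by pop(ind_loc), extend, reset cur_offset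
def csrStepA (m : List (List Int)) (s : List Int × List Int × List Int × Int) (i : Int) :
    List Int × List Int × List Int × Int :=
  let n : Int := (m.length : Int)
  let offsets := s.1 ++ [s.2.2.2]
  match PySem.List.pop? (PySem.List.pyRange 0 n 1) i,
        PySem.List.pop? (PySem.List.pyGetD m i []) i with
  | some (_, newEdges), some (_, newWeights) =>
      let edges := s.2.1 ++ newEdges
      let weights := s.2.2.1 ++ newWeights
      (offsets, edges, weights, (edges.length : Int))
  | _, _ => (offsets, s.2.1, s.2.2.1, s.2.2.2)   -- pop(ind_loc) raised IndexError: outside Pre_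

def convert_cost_matrix_to_csr (np_cost_matrix : List (List Int)) : List Int × List Int × List Int :=
  let n : Int := (np_cost_matrix.length : Int)
  let r := (PySem.List.pyRange 0 n 1).foldl (csrStepA np_cost_matrix) ([], [], [], 0)
  (r.1 ++ [r.2.2.2], r.2.1, r.2.2.1)

-- ===== PORT B =====
def convert_cost_matrix_to_csr_alt (np_cost_matrix : List (List Int)) : List Int × List Int × List Int :=
  let n : Int := (np_cost_matrix.length : Int)
  let offsets := (PySem.List.pyRange 0 (n + 1) 1).map (fun i => i * (n - 1))
  let edges := (PySem.List.pyRange 0 n 1).flatMap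
      (fun i => (PySem.List.pyRange 0 n 1).filter (fun j => j ≠ i))
  let weights := (PySem.List.pyRange 0 n 1).flatMap
      (fun i => ((PySem.List.pyRange 0 n 1).filter (fun j => j ≠ i)).map
        (fun j => PySem.List.pyGetD (PySem.List.pyGetD np_cost_matrix i []) j 0))
  (offsets, edges, weights)

-- ===== PRECONDITION & SPEC =====
-- Pre_ requires a genuine square cost matrix (every row of length num_nodes): on ragged inputs
-- A either raises IndexError from pop(ind_loc) or returns a malformed CSR whose weights list keeps
-- a long row's extra trailing entries and no longer aligns with offsets/edges — an accident of A's
-- pop-based row copy, which B (indexing only columns 0..num_nodes-1) does not reproduce.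
def Pre_convert_cost_matrix_to_csr (np_cost_matrix : List (List Int)) : Prop :=
  ∀ i : Nat, (h : i < np_cost_matrix.length) → (np_cost_matrix[i]).length = np_cost_matrix.length
instance (np_cost_matrix : List (List Int)) : Decidable (Pre_convert_cost_matrix_to_csr np_cost_matrix) := by unfold Pre_convert_cost_matrix_to_csr; infer_instance
def pvWitness_convert_cost_matrix_to_csr : List (List Int) := [[0, 3], [2, 0]]

def Spec_convert_cost_matrix_to_csr (np_cost_matrix : List (List Int)) (out : List Int × List Int × List Int) : Prop := out = convert_cost_matrix_to_csr_alt np_cost_matrix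
instance (np_cost_matrix : List (List Int)) (out : List Int × List Int × List Int) : Decidable (Spec_convert_cost_matrix_to_csr np_cost_matrix out) := by unfold Spec_convert_cost_matrix_to_csr; infer_instance

-- ===== CLAIM (what is proved, stated in full; the proofs are below) =====
def Claim_equal_convert_cost_matrix_to_csr : Prop := ∀ (np_cost_matrix : List (List Int)), Dom_convert_cost_matrix_to_csr np_cost_matrix → Pre_convert_cost_matrix_to_csr np_cost_matrix → Spec_convert_cost_matrix_to_csr np_cost_matrix (convert_cost_matrix_to_csr np_cost_matrix)

-- ===== LEMMAS AND PROOFS =====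

-- removing index i from range n = filtering out the value i
theorem eraseIdx_range_eq_filter (n i : Nat) (hi : i < n) :
    (List.range n).eraseIdx i = (List.range n).filter (fun j => j ≠ i) := by
  induction n with
  | zero => omega
  | succ n ih =>
    rw [List.range_succ]
    rcases Nat.lt_or_ge i n with h | h
    · rw [List.eraseIdx_append_of_lt_length (by simpa using h), ih h,
        List.filter_append]
      have h1 : List.filter (fun j => decide (j ≠ i)) [n] = [n] := by
        simp only [List.filter_cons, List.filter_nil]
        rw [if_pos (by simp; omega)]
      simpa using h1.symm
    · have hin : i = n := by omega
      subst hin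
      rw [List.eraseIdx_append_of_length_le (by simp), List.filter_append]
      have h1 : List.filter (fun j => decide (j ≠ i)) [i] = [] := by
        simp
      have h2 : List.filter (fun j => decide (j ≠ i)) (List.range i) = List.range i := by
        apply List.filter_eq_self.mpr
        intro a ha
        have := List.mem_range.mp ha
        simp
        omega
      simp only [List.length_range, Nat.sub_self, List.eraseIdx_zero, List.tail_cons]
      rw [h1, h2, List.append_nil]

theorem map_eraseIdx' {α β : Type} (f : α → β) (l : List α) (i : Nat) :
    (l.map f).eraseIdx i = (l.eraseIdx i).map f := by
  induction l generalizing i with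
  | nil => simp
  | cons x xs ih =>
    cases i with
    | zero => simp
    | succ i => simp [List.eraseIdx, ih]

-- A's new_edges (pop i of range n) equals B's filtered range
theorem pop_pyRange_eq_filter (n i : Nat) (hi : i < n) :
    (PySem.List.pyRange 0 (n : Int) 1).eraseIdx i
      = (PySem.List.pyRange 0 (n : Int) 1).filter (fun j => j ≠ (i : Int)) := by
  rw [PySem.List.pyRange_one, show (((n : Int) - 0).toNat) = n from by simp]
  rw [map_eraseIdx', List.filter_map, eraseIdx_range_eq_filter n i hi]
  congr 1
  apply List.filter_congr
  intro k _
  simp only [Function.comp]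
  congr 1
  simp only [eq_iff_iff]
  omega

-- a square row indexed over the filtered range equals A's pop (= eraseIdx) of the row
theorem row_index_filter_eq_eraseIdx (row : List Int) (n k : Nat)
    (hlen : row.length = n) (hk : k < n) :
    ((PySem.List.pyRange 0 (n : Int) 1).filter (fun j => j ≠ (k : Int))).map
        (fun j => PySem.List.pyGetD row j 0)
      = row.eraseIdx k := by
  rw [← pop_pyRange_eq_filter n k hk, ← map_eraseIdx']
  subst hlen
  rw [PySem.List.map_pyGetD_pyRange_zero']

-- main loop lemma: A's fold over the index range characterised in B's terms
theorem loopA (m : List (List Int))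
    (hpre : ∀ i : Nat, (h : i < m.length) → (m[i]).length = m.length) :
    ∀ (d k : Nat), k + d = m.length →
    ∀ (o e w : List Int), e.length = k * (m.length - 1) →
    (PySem.List.pyRange (k : Int) (m.length : Int) 1).foldl (csrStepA m) (o, e, w, (e.length : Int))
      = (o ++ (PySem.List.pyRange (k : Int) (m.length : Int) 1).map (fun i => i * ((m.length : Int) - 1)),
         e ++ (PySem.List.pyRange (k : Int) (m.length : Int) 1).flatMap
             (fun i => (PySem.List.pyRange 0 (m.length : Int) 1).filter (fun j => j ≠ i)),
         w ++ (PySem.List.pyRange (k : Int) (m.length : Int) 1).flatMap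
             (fun i => ((PySem.List.pyRange 0 (m.length : Int) 1).filter (fun j => j ≠ i)).map
                 (fun j => PySem.List.pyGetD (PySem.List.pyGetD m i []) j 0)),
         ((m.length * (m.length - 1) : Nat) : Int)) := by
  intro d
  induction d with
  | zero =>
    intro k hk o e w he
    have hk' : k = m.length := by omega
    subst hk'
    rw [PySem.List.pyRange_one_eq_nil (by omega)]
    simp [he]
  | succ d ih =>
    intro k hk o e w he
    have hklt : k < m.length := by omega
    rw [PySem.List.pyRange_one_cons (by exact_mod_cast hklt)]
    simp only [List.foldl_cons, List.map_cons, List.flatMap_cons]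
    have hrow : PySem.List.pyGetD m (k : Int) [] = m[k]'hklt := by
      rw [PySem.List.pyGetD_natCast]
      exact List.getD_eq_getElem _ _ hklt
    have hlenR : (PySem.List.pyRange 0 (m.length : Int) 1).length = m.length := by
      rw [PySem.List.length_pyRange_one]; simp
    have hpop1 : PySem.List.pop? (PySem.List.pyRange 0 (m.length : Int) 1) (k : Int)
        = some ((PySem.List.pyRange 0 (m.length : Int) 1)[k]'(by omega),
                (PySem.List.pyRange 0 (m.length : Int) 1).eraseIdx k) :=
      PySem.List.pop?_natCast _ _ (by omega)
    have hrk : k < (m[k]'hklt).length := by rw [hpre k hklt]; exact hklt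
    have hpop2 : PySem.List.pop? (m[k]'hklt) (k : Int)
        = some ((m[k]'hklt)[k]'hrk, (m[k]'hklt).eraseIdx k) :=
      PySem.List.pop?_natCast _ _ hrk
    have hstep : csrStepA m (o, e, w, (e.length : Int)) (k : Int)
        = (o ++ [(e.length : Int)],
           e ++ (PySem.List.pyRange 0 (m.length : Int) 1).eraseIdx k,
           w ++ (m[k]'hklt).eraseIdx k,
           ((e ++ (PySem.List.pyRange 0 (m.length : Int) 1).eraseIdx k).length : Int)) := by
      unfold csrStepA
      rw [hrow]
      simp only [hpop1, hpop2]
    rw [hstep]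
    have hlenE : (e ++ (PySem.List.pyRange 0 (m.length : Int) 1).eraseIdx k).length
        = (k + 1) * (m.length - 1) := by
      rw [List.length_append, he, List.length_eraseIdx,
        if_pos (by rw [hlenR]; omega), hlenR, Nat.succ_mul]
    have hrec := ih (k + 1) (by omega)
      (o ++ [(e.length : Int)])
      (e ++ (PySem.List.pyRange 0 (m.length : Int) 1).eraseIdx k)
      (w ++ (m[k]'hklt).eraseIdx k)
      hlenE
    rw [show ((k : Int) + 1) = ((k + 1 : Nat) : Int) from by push_cast; ring, hrec]
    have hoff : ((k * (m.length - 1) : Nat) : Int) = (k : Int) * ((m.length : Int) - 1) := by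
      have h1 : (1 : Nat) ≤ m.length := by omega
      push_cast [Nat.cast_sub h1]
      ring
    have hedge : (PySem.List.pyRange 0 (m.length : Int) 1).eraseIdx k
        = (PySem.List.pyRange 0 (m.length : Int) 1).filter (fun j => j ≠ (k : Int)) :=
      pop_pyRange_eq_filter m.length k hklt
    have hwt : ((PySem.List.pyRange 0 (m.length : Int) 1).filter (fun j => j ≠ (k : Int))).map
          (fun j => PySem.List.pyGetD (PySem.List.pyGetD m (k : Int) []) j 0)
        = (m[k]'hklt).eraseIdx k := by
      rw [hrow]
      exact row_index_filter_eq_eraseIdx (m[k]'hklt) m.length k (hpre k hklt) hklt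
    rw [hwt]
    simp [he, hoff, hedge, List.append_assoc]

-- B's offsets component equals A's: range(n+1) splits as range n ++ [n]
theorem alt_offsets_eq (m : List (List Int)) :
    (PySem.List.pyRange 0 ((m.length : Int) + 1) 1).map (fun i => i * ((m.length : Int) - 1))
      = (PySem.List.pyRange 0 (m.length : Int) 1).map (fun i => i * ((m.length : Int) - 1))
        ++ [((m.length * (m.length - 1) : Nat) : Int)] := by
  rw [PySem.List.pyRange_one_succ_right (by positivity), List.map_append]
  congr 1
  simp only [List.map_cons, List.map_nil]
  congr 1
  rcases Nat.eq_zero_or_pos m.length with h | h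
  · simp [h]
  · push_cast [Nat.cast_sub h]
    ring

-- ===== VERDICT (by name: the statement is the Claim_ definition above) =====
theorem convert_cost_matrix_to_csr_spec : Claim_equal_convert_cost_matrix_to_csr := by
  intro m _ hpre
  unfold Spec_convert_cost_matrix_to_csr
  have hmain := loopA m hpre m.length 0 (by omega) [] [] [] (by simp)
  simp only [Nat.cast_zero, List.length_nil] at hmain
  unfold convert_cost_matrix_to_csr convert_cost_matrix_to_csr_alt
  dsimp only
  rw [hmain]
  simp only [List.nil_append]
  rw [alt_offsets_eq]
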